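-- pv_equiv track=rewrite | github.com/Aquamoris/Algorithms | rabin_karp_search/rabin_karp.py | rabin_karp_alg
-- ===== SOURCE A (Python) =====
-- def character_by_character(first_string, second_string):
--     for i in range(len(first_string)):
--         if first_string[i] != second_string[i]:
--             return False
--     return True
--
-- def hash_function(string):
--     hash_size = 0
--     for i in string:
--         hash_size += ord(i)
--     return hash_size
--
-- def rabin_karp_alg(string, pattern, amount):
--     count = 0
--     length_string, length_pattern = len(string), len(pattern)
--     hash_pattern = hash_function(pattern)
--
--     hash_string = hash_function(string[0:length_pattern])
--
--     for i in range(int(length_string-length_pattern+1)):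
--         if hash_string == hash_pattern:
--             if character_by_character(string[i:i+length_pattern], pattern):
--                 count += 1
--         hash_string -= hash_function(string[i:i+length_pattern])
--         hash_string += hash_function(string[i+1:i+length_pattern+1])
--
--     if count == amount:
--         return True
--     else:
--         return False
-- ===== SOURCE B (Python) =====
-- def rabin_karp_alg(string, pattern, amount):
--     n, m = len(string), len(pattern)
--     if m > n:
--         return amount == 0
--     target = sum(map(ord, pattern))
--     h = sum(map(ord, string[:m]))
--     count = 0
--     for i in range(n - m + 1):
--         if h == target and string[i:i+m] == pattern:
--             count += 1
--         if i + m < n: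
--             h += ord(string[i+m]) - ord(string[i])
--     return count == amount
-- ===== Notes on version B (the rewrite author's own statement) =====
-- stated objective: faster
-- what changed: A rehashes every m-character window from scratch each iteration (and slices twice more to 'roll'); B keeps one running hash and updates it in O(1) by adding the incoming and subtracting the outgoing character, comparing the slice only on a hash hit.
import Mathlib
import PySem

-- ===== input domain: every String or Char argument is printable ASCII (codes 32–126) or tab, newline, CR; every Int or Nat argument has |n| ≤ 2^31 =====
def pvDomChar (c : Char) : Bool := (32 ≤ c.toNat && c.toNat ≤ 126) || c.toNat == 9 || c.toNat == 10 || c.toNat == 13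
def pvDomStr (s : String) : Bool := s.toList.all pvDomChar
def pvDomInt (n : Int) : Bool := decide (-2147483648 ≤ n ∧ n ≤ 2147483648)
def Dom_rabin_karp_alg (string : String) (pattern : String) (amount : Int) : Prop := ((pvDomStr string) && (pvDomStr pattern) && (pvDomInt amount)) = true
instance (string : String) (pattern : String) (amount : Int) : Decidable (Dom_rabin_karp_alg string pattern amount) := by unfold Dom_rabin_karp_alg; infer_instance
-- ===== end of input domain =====

-- B replaces A's per-window rehash (O(n*m)) by a true rolling hash update (O(n+m)); return values agree everywhere.

-- ===== PORT A =====
-- character_by_character: index-by-index comparison (early False on first mismatch)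
def pvCbc (a b : List Char) : Bool :=
  (List.range a.length).all (fun i => PySem.List.pyGet? a (i : Int) == PySem.List.pyGet? b (i : Int))

-- hash_function: running sum of ord over the string
def pvHash (l : List Char) : Int :=
  l.foldl (fun h c => h + (c.toNat : Int)) 0

def rabin_karp_alg (string : String) (pattern : String) (amount : Int) : Bool :=
  let s := string.toList
  let p := pattern.toList
  let ls : Int := s.length
  let lp : Int := p.length
  let hp := pvHash p
  let h0 := pvHash (PySem.List.slice s (some 0) (some lp))
  let st := (PySem.List.pyRange 0 (ls - lp + 1) 1).foldl (fun (st : Int × Int) i =>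
      (if st.2 == hp && pvCbc (PySem.List.slice s (some i) (some (i + lp))) p then st.1 + 1 else st.1,
       st.2 - pvHash (PySem.List.slice s (some i) (some (i + lp)))
            + pvHash (PySem.List.slice s (some (i + 1)) (some (i + lp + 1))))) ((0 : Int), h0)
  st.1 == amount

-- ===== PORT B =====
-- sum(map(ord, l))
def pvOrds (l : List Char) : Int :=
  (l.map (fun c => (c.toNat : Int))).sum

def rabin_karp_alg_alt (string : String) (pattern : String) (amount : Int) : Bool :=
  let s := string.toList
  let p := pattern.toList
  let n := s.length
  let m := p.length
  if m > n then amount == 0 else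
    let target := pvOrds p
    let h0 := pvOrds (s.take m)
    let st := (List.range (n - m + 1)).foldl (fun (st : Int × Int) i =>
        (if st.2 == target && ((s.drop i).take m == p) then st.1 + 1 else st.1,
         if i + m < n then st.2 + ((s.getD (i + m) ' ').toNat : Int) - ((s.getD i ' ').toNat : Int) else st.2))
      ((0 : Int), h0)
    st.1 == amount

-- ===== PRECONDITION & SPEC =====
def Spec_rabin_karp_alg (string : String) (pattern : String) (amount : Int) (out : Bool) : Prop := out = rabin_karp_alg_alt string pattern amount
instance (string : String) (pattern : String) (amount : Int) (out : Bool) : Decidable (Spec_rabin_karp_alg string pattern amount out) := by unfold Spec_rabin_karp_alg; infer_instance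

-- ===== CLAIM (what is proved, stated in full; the proofs are below) =====
def Claim_equal_rabin_karp_alg : Prop := ∀ (string : String) (pattern : String) (amount : Int), Dom_rabin_karp_alg string pattern amount → Spec_rabin_karp_alg string pattern amount (rabin_karp_alg string pattern amount)

-- ===== LEMMAS AND PROOFS =====

theorem pvHash_go (l : List Char) : ∀ (a : Int), l.foldl (fun h c => h + (c.toNat : Int)) a = a + pvOrds l := by
  induction l with
  | nil => intro a; simp [pvOrds]
  | cons x xs ih => intro a; simp only [List.foldl_cons, ih, pvOrds, List.map_cons, List.sum_cons]; ring

theorem pvHash_eq_ords (l : List Char) : pvHash l = pvOrds l := by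
  simpa using pvHash_go l 0

theorem pvCbc_eq (a b : List Char) (h : a.length = b.length) : pvCbc a b = (a == b) := by
  rw [Bool.eq_iff_iff]
  simp only [pvCbc, List.all_eq_true, List.mem_range, beq_iff_eq, PySem.List.pyGet?_natCast]
  constructor
  · intro hp
    apply List.ext_getElem h
    intro i h1 h2
    have := hp i h1
    simp [h1, h2] at this
    exact this
  · rintro rfl; intro i _; rfl

theorem pvRoll (s : List Char) (m j : Nat) (h : j + m < s.length) :
    pvHash ((s.drop j).take m) + ((s.getD (j + m) ' ').toNat : Int) - ((s.getD j ' ').toNat : Int)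
      = pvHash ((s.drop (j + 1)).take m) := by
  have hj : j < s.length := by omega
  have hjm : j + m < s.length := h
  have hdrop : s.drop j = s[j] :: s.drop (j + 1) := List.drop_eq_getElem_cons hj
  have hgj : s.getD j ' ' = s[j] := by rw [List.getD_eq_getElem?_getD, List.getElem?_eq_getElem hj]; rfl
  have hgjm : s.getD (j + m) ' ' = s[j + m] := by
    rw [List.getD_eq_getElem?_getD, List.getElem?_eq_getElem hjm]; rfl
  cases m with
  | zero => simp
  | succ m' =>
    have hlen : m' < (s.drop (j + 1)).length := by simp [List.length_drop]; omega
    have htake : (s.drop (j + 1)).take (m' + 1) = (s.drop (j + 1)).take m' ++ [(s.drop (j + 1))[m']] := by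
      rw [List.take_add_one, List.getElem?_eq_getElem hlen]; rfl
    have hel : (s.drop (j + 1))[m']'hlen = s[j + 1 + m']'(by omega) := List.getElem_drop ..
    rw [hdrop, htake, hel, hgj, hgjm]
    simp only [List.take_succ_cons, pvHash, List.foldl_cons, List.foldl_append]
    rw [pvHash_go, pvHash_go, pvHash_go]
    have : j + (m' + 1) = j + 1 + m' := by omega
    simp [pvOrds, this]
    ring

def stepA (s p : List Char) (st : Int × Int) (i : Nat) : Int × Int :=
  (if st.2 == pvHash p && pvCbc (PySem.List.slice s (some (i : Int)) (some ((i : Int) + (p.length : Int)))) p then st.1 + 1 else st.1,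
   st.2 - pvHash (PySem.List.slice s (some (i : Int)) (some ((i : Int) + (p.length : Int))))
        + pvHash (PySem.List.slice s (some ((i : Int) + 1)) (some ((i : Int) + (p.length : Int) + 1))))
def stepB (s p : List Char) (st : Int × Int) (i : Nat) : Int × Int :=
  (if st.2 == pvOrds p && ((s.drop i).take p.length == p) then st.1 + 1 else st.1,
   if i + p.length < s.length then st.2 + ((s.getD (i + p.length) ' ').toNat : Int) - ((s.getD i ' ').toNat : Int) else st.2)

theorem loop_eq (s p : List Char) (hm : p.length ≤ s.length) :
    ∀ (K j : Nat) (c h : Int), j + K = s.length - p.length + 1 →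
      h = pvHash ((s.drop j).take p.length) →
      ((List.range' j K).foldl (stepA s p) (c, h)).1 = ((List.range' j K).foldl (stepB s p) (c, h)).1 := by
  intro K
  induction K with
  | zero => intro j c h _ _; simp
  | succ K ih =>
    intro j c h hK hh
    have hj : j ≤ s.length - p.length := by omega
    have hs1 : PySem.List.slice s (some (j : Int)) (some ((j : Int) + (p.length : Int))) = (s.drop j).take p.length :=
      PySem.List.slice_natCast_add ..
    have hcast : ((j : Int) + (p.length : Int) + 1) = (((j + 1 : Nat) : Int) + (p.length : Int)) := by push_cast; ring
    have hcast1 : ((j : Int) + 1) = ((j + 1 : Nat) : Int) := by push_cast; ring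
    have hs2 : PySem.List.slice s (some ((j : Int) + 1)) (some ((j : Int) + (p.length : Int) + 1)) = (s.drop (j + 1)).take p.length := by
      rw [hcast, hcast1]; exact PySem.List.slice_natCast_add ..
    have hlen : ((s.drop j).take p.length).length = p.length := by
      simp [List.length_take, List.length_drop]; omega
    have hcond : (h == pvHash p && pvCbc ((s.drop j).take p.length) p)
        = (h == pvOrds p && ((s.drop j).take p.length == p)) := by
      rw [pvHash_eq_ords, pvCbc_eq _ _ hlen]
    have hA : stepA s p (c, h) j
        = ((if h == pvOrds p && ((s.drop j).take p.length == p) then c + 1 else c), pvHash ((s.drop (j + 1)).take p.length)) := by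
      simp only [stepA, hs1, hs2, hh, sub_self, zero_add, pvHash_eq_ords, pvCbc_eq _ _ hlen]
    rw [List.range'_succ, List.foldl_cons, List.foldl_cons, hA]
    by_cases hlt : j + p.length < s.length
    · have hB : stepB s p (c, h) j
          = ((if h == pvOrds p && ((s.drop j).take p.length == p) then c + 1 else c), pvHash ((s.drop (j + 1)).take p.length)) := by
        simp only [stepB, if_pos hlt, hh]
        rw [pvRoll s p.length j hlt]
      rw [hB]
      exact ih (j + 1) _ _ (by omega) rfl
    · have hK0 : K = 0 := by omega
      subst hK0
      simp [stepB, if_neg hlt]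

-- ===== VERDICT (by name: the statement is the Claim_ definition above) =====
theorem rabin_karp_alg_spec : Claim_equal_rabin_karp_alg := by
  intro string pattern amount _
  unfold Spec_rabin_karp_alg rabin_karp_alg rabin_karp_alg_alt
  simp only []
  by_cases hmn : pattern.toList.length > string.toList.length
  · rw [if_pos hmn, PySem.List.pyRange_one_eq_nil (by omega)]
    simp only [List.foldl_nil]
    rw [Bool.eq_iff_iff]
    simp only [beq_iff_eq]
    omega
  · rw [if_neg hmn]
    rw [not_lt] at hmn
    have hN : (string.toList.length : Int) - pattern.toList.length + 1
        = ((string.toList.length - pattern.toList.length + 1 : Nat) : Int) := by omega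
    rw [hN, PySem.List.pyRange_zero_natCast, List.foldl_map]
    have hinit : pvHash (PySem.List.slice string.toList (some 0) (some (pattern.toList.length : Int)))
        = pvHash (string.toList.take pattern.toList.length) := by
      rw [PySem.List.slice_zero_start, PySem.List.slice_to_natCast]
    have hinit2 : pvOrds (string.toList.take pattern.toList.length)
        = pvHash (string.toList.take pattern.toList.length) := (pvHash_eq_ords _).symm
    rw [hinit, hinit2]
    have hmain := loop_eq string.toList pattern.toList hmn
      (string.toList.length - pattern.toList.length + 1) 0 0
      (pvHash (string.toList.take pattern.toList.length)) (by omega) (by simp)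
    rw [← List.range_eq_range'] at hmain
    show ((List.foldl (stepA string.toList pattern.toList)
        ((0 : Int), pvHash (string.toList.take pattern.toList.length))
        (List.range (string.toList.length - pattern.toList.length + 1))).1 == amount)
      = ((List.foldl (stepB string.toList pattern.toList)
        ((0 : Int), pvHash (string.toList.take pattern.toList.length))
        (List.range (string.toList.length - pattern.toList.length + 1))).1 == amount)
    rw [hmain]
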